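-- pv_equiv track=rewrite | github.com/tac-tac-go/Codewars | Make a square box/Make a square box.py | box
-- ===== SOURCE A (Python) =====
-- def box(n):
--     result = []
--     for i in range(n):
--         tmp = " "*n
--         if (i+1)==1 or (i+1)==n:
--             tmp = "-"*n
--         else:
--             tmp="-"+" "*(n-2)+"-"
--         result.append(tmp)
--     return result
-- ===== SOURCE B (Python) =====
-- def box(n):
--     if n <= 0:
--         return []
--     if n == 1:
--         return ['-']
--     border = '-' * n
--     middle = '-' + ' ' * (n - 2) + '-'
--     return [border] + [middle] * (n - 2) + [border]
-- ===== Notes on version B (the rewrite author's own statement) =====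
-- stated objective: simpler
-- what changed: Replaces the per-index loop with per-row branching by two template strings assembled via list concatenation and repetition ([border] + [middle]*(n-2) + [border]) behind small guards for the empty and single-row cases.
import Mathlib
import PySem

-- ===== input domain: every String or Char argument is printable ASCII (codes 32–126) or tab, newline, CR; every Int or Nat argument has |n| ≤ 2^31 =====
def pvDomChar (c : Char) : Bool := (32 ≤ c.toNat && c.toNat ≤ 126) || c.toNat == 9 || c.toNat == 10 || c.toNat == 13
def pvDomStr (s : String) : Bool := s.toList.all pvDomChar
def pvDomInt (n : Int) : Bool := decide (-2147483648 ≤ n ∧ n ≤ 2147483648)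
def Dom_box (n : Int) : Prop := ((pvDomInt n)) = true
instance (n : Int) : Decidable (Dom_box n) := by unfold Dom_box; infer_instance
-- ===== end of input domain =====

-- B replaces A's per-index loop (with per-row branching) by two template strings and
-- list concatenation/repetition; objective: simpler.

-- ===== PORT A =====
-- '" "*n' / '"-"*n' are ported by hand as String.ofList (List.replicate n.toNat c):
-- exact, since Python's string repetition with a non-positive count yields "".
def box (n : Int) : List String :=
  (PySem.List.pyRange 0 n 1).foldl
    (fun result i =>
      let tmp := String.ofList (List.replicate n.toNat ' ')
      let tmp := if i + 1 = 1 ∨ i + 1 = n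
        then String.ofList (List.replicate n.toNat '-')
        else String.ofList ('-' :: (List.replicate (n - 2).toNat ' ' ++ ['-']))
      result ++ [tmp]) []

-- ===== PORT B =====
def box_alt (n : Int) : List String :=
  if n ≤ 0 then []
  else if n = 1 then ["-"]
  else
    let border := String.ofList (List.replicate n.toNat '-')
    let middle := String.ofList ('-' :: (List.replicate (n - 2).toNat ' ' ++ ['-']))
    [border] ++ List.replicate (n - 2).toNat middle ++ [border]

-- ===== PRECONDITION & SPEC =====
def Spec_box (n : Int) (out : List String) : Prop := out = box_alt n
instance (n : Int) (out : List String) : Decidable (Spec_box n out) := by unfold Spec_box; infer_instance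

-- ===== CLAIM (what is proved, stated in full; the proofs are below) =====
def Claim_equal_box : Prop := ∀ (n : Int), Dom_box n → Spec_box n (box n)

-- ===== LEMMAS AND PROOFS =====

-- the row A's loop body produces for index i
def pvRow (n i : Int) : String :=
  if i + 1 = 1 ∨ i + 1 = n
    then String.ofList (List.replicate n.toNat '-')
    else String.ofList ('-' :: (List.replicate (n - 2).toNat ' ' ++ ['-']))

-- an append-accumulating foldl is a map
theorem pv_foldl_append_map {α β : Type} (f : α → β) :
    ∀ (l : List α) (acc : List β),
      l.foldl (fun r i => r ++ [f i]) acc = acc ++ l.map f := by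
  intro l
  induction l with
  | nil => simp
  | cons x t ih => intro acc; simp [List.foldl, ih]

theorem pv_box_eq_map (n : Int) :
    box n = (PySem.List.pyRange 0 n 1).map (pvRow n) := by
  simp only [box]
  exact pv_foldl_append_map _ _ []

-- every interior index yields the middle row
theorem pv_map_middle (n : Int) :
    ∀ (a : Int), 1 ≤ a →
      (PySem.List.pyRange a (n - 1) 1).map (pvRow n)
        = List.replicate (n - 1 - a).toNat
            (String.ofList ('-' :: (List.replicate (n - 2).toNat ' ' ++ ['-']))) := by
  intro a ha
  rw [List.eq_replicate_iff]
  constructor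
  · simp [PySem.List.length_pyRange_one]
  · intro b hb
    obtain ⟨i, hi, rfl⟩ := List.mem_map.mp hb
    rw [PySem.List.mem_pyRange_one] at hi
    have h1 : ¬ (i + 1 = 1) := by omega
    have h2 : ¬ (i + 1 = n) := by omega
    simp [pvRow, h1, h2]

theorem pv_box_spec : ∀ (n : Int), box n = box_alt n := by
  intro n
  rw [pv_box_eq_map]
  by_cases h0 : n ≤ 0
  · rw [PySem.List.pyRange_one_eq_nil h0]
    simp [box_alt, h0]
  · by_cases h1 : n = 1
    · subst h1; decide
    · have h2 : 2 ≤ n := by omega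
      have hsplit : PySem.List.pyRange 0 n 1
          = 0 :: (PySem.List.pyRange 1 (n - 1) 1 ++ [n - 1]) := by
        rw [PySem.List.pyRange_one_cons (by omega)]
        have : PySem.List.pyRange (0 + 1) n 1
            = PySem.List.pyRange 1 (n - 1) 1 ++ [n - 1] := by
          have := PySem.List.pyRange_one_succ_right (a := 1) (b := n - 1) (by omega)
          simpa [show n - 1 + 1 = n by ring] using this
        rw [this]
      rw [hsplit]
      have hfirst : pvRow n 0 = String.ofList (List.replicate n.toNat '-') := by
        simp [pvRow]
      have hlast : pvRow n (n - 1) = String.ofList (List.replicate n.toNat '-') := by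
        have : (n - 1) + 1 = n := by ring
        simp [pvRow, this]
      simp only [List.map_cons, List.map_append, List.map_nil, hfirst, hlast,
        pv_map_middle n 1 le_rfl]
      simp [box_alt, h0, h1, show n - 1 - 1 = n - 2 by ring]

-- ===== VERDICT (by name: the statement is the Claim_ definition above) =====
theorem box_spec : Claim_equal_box := by
  intro n _
  exact pv_box_spec n
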